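-- pv_equiv track=rewrite | github.com/sheldoer/Suda_examination_notes | 复试笔记/21笔试代码/第四题/24191.py | find_major
-- ===== SOURCE A (Python) =====
-- def find_major(L):
--     length=len(L)
--     lst=[]
--     res=set()
--     for i in L:
--         for j in list(i):
--             lst.append(j)
--     for i in set(lst):
--         if lst.count(i)>length/2:
--             res.add(i)
--     if len(res)>0:
--         return res
-- ===== SOURCE B (Python) =====
-- def find_major(L):
--     # Sort all characters, then count runs of equal characters in one scan;
--     # a character is a majority char iff its run length exceeds len(L)/2.
--     chars = [c for s in L for c in s]
--     majors = []
--     prev = None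
--     run = 0
--     for c in sorted(chars):
--         if c == prev:
--             run += 1
--         else:
--             if prev is not None and run > len(L) / 2:
--                 majors.append(prev)
--             prev = c
--             run = 1
--     if prev is not None and run > len(L) / 2:
--         majors.append(prev)
--     res = {c for c in chars if c in majors}
--     return res or None
-- ===== Notes on version B (the rewrite author's own statement) =====
-- stated objective: alternative
-- what changed: A flattens all characters and calls lst.count(i) once per distinct character (a full rescan each time); B instead sorts the flattened characters once and finds each character's count as the length of its run in a single scan of the sorted list, then keeps the characters whose run beat len(L)/2.
import Mathlib
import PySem

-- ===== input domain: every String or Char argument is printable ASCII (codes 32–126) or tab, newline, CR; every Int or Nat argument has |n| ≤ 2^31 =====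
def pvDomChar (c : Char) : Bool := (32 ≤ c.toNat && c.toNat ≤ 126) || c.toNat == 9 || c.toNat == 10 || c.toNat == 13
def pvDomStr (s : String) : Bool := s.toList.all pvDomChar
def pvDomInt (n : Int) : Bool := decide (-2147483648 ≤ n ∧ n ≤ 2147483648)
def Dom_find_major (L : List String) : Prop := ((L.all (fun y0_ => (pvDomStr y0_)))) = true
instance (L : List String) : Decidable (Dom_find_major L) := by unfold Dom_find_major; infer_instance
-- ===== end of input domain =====

-- B replaces A's per-distinct-character rescan of the flattened list (lst.count) by sorting the
-- flattened characters once and reading each count off as a run length in one scan; objective: alternative.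

-- ===== PORT A =====
-- 'lst.count(i) > length/2' (float division, integer count) is ported as the integer-exact '2 * count > length'.
def find_major (L : List String) : Option (List String) :=
  let length : Int := (L.length : Int)
  let lst : List Char := L.foldl (fun acc i => i.toList.foldl (fun a j => a ++ [j]) acc) []
  let res : PySem.Set String :=
    (PySem.Set.ofList lst).foldl
      (fun r i => if 2 * (lst.count i : Int) > length then PySem.Set.add r (String.ofList [i]) else r)
      PySem.Set.empty
  if res.length > 0 then some res else none

-- ===== PORT B =====
-- one loop step of B's run scan over the sorted character list; state = (majors, prev, run)
def fmStep (length : Int) : (List Char × Option Char × Int) → Char → (List Char × Option Char × Int)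
  | (majors, prev, run), c =>
    if some c == prev then (majors, prev, run + 1)
    else
      match prev with
      | some p => ((if 2 * run > length then majors ++ [p] else majors), some c, 1)
      | none => (majors, some c, 1)

-- B's trailing 'if prev is not None and run > len(L)/2: majors.append(prev)'
def fmFlush (length : Int) : (List Char × Option Char × Int) → List Char
  | (majors, some p, run) => if 2 * run > length then majors ++ [p] else majors
  | (majors, none, _) => majors

-- 'run > len(L)/2' (float division, integer run) is ported as the integer-exact '2 * run > length'.
def find_major_alt (L : List String) : Option (List String) :=
  let length : Int := (L.length : Int)
  let chars : List Char := L.flatMap (fun s => s.toList)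
  let majors : List Char :=
    fmFlush length ((PySem.List.sorted chars (fun x => x) false).foldl (fmStep length) ([], none, 0))
  let res : PySem.Set String :=
    PySem.Set.ofList ((chars.filter (fun c => majors.contains c)).map (fun c => String.ofList [c]))
  if res = [] then none else some res

-- ===== PRECONDITION & SPEC =====
def Spec_find_major (L : List String) (out : Option (List String)) : Prop := out = find_major_alt L
instance (L : List String) (out : Option (List String)) : Decidable (Spec_find_major L out) := by unfold Spec_find_major; infer_instance

-- ===== CLAIM (what is proved, stated in full; the proofs are below) =====
def Claim_equal_find_major : Prop := ∀ (L : List String), Dom_find_major L → Spec_find_major L (find_major L)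

-- ===== LEMMAS AND PROOFS =====

theorem pv_ofList_inj : Function.Injective (fun c : Char => String.ofList [c]) := by
  intro a b h
  have := congrArg String.toList h
  simpa using this

-- A's guarded Set.add loop over a Nodup key list is a filter-and-map, provided the images are fresh.
theorem pv_fold_add_eq (p : Char → Prop) [DecidablePred p] :
    ∀ (ks : List Char), ks.Nodup → ∀ (acc : List String), (∀ c ∈ ks, String.ofList [c] ∉ acc) →
      ks.foldl (fun r c => if p c then PySem.Set.add r (String.ofList [c]) else r) acc
        = acc ++ (ks.filter (fun c => decide (p c))).map (fun c => String.ofList [c]) := by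
  intro ks
  induction ks with
  | nil => simp
  | cons c t ih =>
    intro hnd acc hfresh
    simp only [List.foldl_cons, List.filter_cons]
    by_cases hp : p c
    · rw [if_pos hp, PySem.Set.add_of_not_mem (hfresh c (by simp))]
      rw [ih (List.nodup_cons.mp hnd).2 (acc ++ [String.ofList [c]])]
      · simp [hp]
      · intro c' hc'
        simp only [List.mem_append, List.mem_singleton, not_or]
        refine ⟨hfresh c' (by simp [hc']), fun h => ?_⟩
        exact (List.nodup_cons.mp hnd).1 (pv_ofList_inj h ▸ hc')
    · rw [if_neg hp, ih (List.nodup_cons.mp hnd).2 acc (fun c' hc' => hfresh c' (by simp [hc']))]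
      simp [hp]

-- The normal form of A's result list.
theorem pv_A_res (L : List String) :
    ((PySem.Set.ofList (L.flatMap (·.toList))).foldl
      (fun r i => if 2 * ((L.flatMap (·.toList)).count i : Int) > (L.length : Int)
                  then PySem.Set.add r (String.ofList [i]) else r)
      PySem.Set.empty)
      = ((PySem.Set.ofList (L.flatMap (·.toList))).filter
          (fun c => decide (2 * ((L.flatMap (·.toList)).count c : Int) > (L.length : Int)))).map
          (fun c => String.ofList [c]) := by
  rw [pv_fold_add_eq (fun i => 2 * (((L.flatMap (·.toList)).count i : Int)) > (L.length : Int))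
        (PySem.Set.ofList (L.flatMap (·.toList))) (PySem.Set.nodup_ofList _)
        PySem.Set.empty (by simp [PySem.Set.empty])]
  simp [PySem.Set.empty]

theorem pv_flatten (L : List String) :
    L.foldl (fun acc i => i.toList.foldl (fun a j => a ++ [j]) acc) ([] : List Char)
      = L.flatMap (·.toList) := by
  simp only [PySem.List.foldl_append_singleton_eq_self]
  rw [PySem.List.foldl_append_eq_flatMap]
  simp

-- the run-length counts of a list, as a recursion on the distinct heads
def majorsOf (length : Int) : List Char → List Char
  | [] => []
  | c :: u =>
      (if 2 * (1 + (u.count c : Int)) > length then [c] else [])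
        ++ majorsOf length (u.filter (fun x => x ≠ c))
termination_by l => l.length
decreasing_by
  simpa using Nat.lt_succ_of_le
    (le_trans (List.length_filter_le _ _) (Nat.le_of_eq (List.length_attach (l := u))))

-- B's scan of a sorted tail from a live state (p, r): emits p's run, then the runs of the rest.
theorem pv_fm_foldl (t : Int) (s : List Char) (hs : s.Pairwise (· ≤ ·)) :
    ∀ (p : Char), (∀ x ∈ s, p ≤ x) → ∀ (m : List Char) (r : Int),
      fmFlush t (s.foldl (fmStep t) (m, some p, r))
        = m ++ (if 2 * (r + (s.count p : Int)) > t then [p] else [])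
            ++ majorsOf t (s.filter (fun x => x ≠ p)) := by
  induction s with
  | nil =>
    intro p _ m r
    simp only [List.foldl_nil, fmFlush, List.count_nil, List.filter_nil, majorsOf.eq_1,
      Nat.cast_zero, add_zero, List.append_nil]
    split_ifs <;> simp
  | cons c s ih =>
    intro p hp m r
    have hc : ∀ x ∈ s, c ≤ x := fun x hx => (List.pairwise_cons.mp hs).1 x hx
    have hs' : s.Pairwise (· ≤ ·) := (List.pairwise_cons.mp hs).2
    by_cases hcp : c = p
    · subst hcp
      have hstep : fmStep t (m, some c, r) c = (m, some c, r + 1) := by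
        simp [fmStep]
      rw [List.foldl_cons, hstep, ih hs' c hc m (r + 1)]
      have hcond : (2 * (r + 1 + (s.count c : Int)) > t) ↔ (2 * (r + ((c :: s).count c : Int)) > t) := by
        rw [List.count_cons_self]
        push_cast
        constructor <;> intro <;> omega
      have h1 : (c :: s).filter (fun x => x ≠ c) = s.filter (fun x => x ≠ c) := by
        simp
      rw [if_congr hcond rfl rfl, h1]
    · -- new character: p < c ≤ every element of s, so p does not occur again
      have hpc : p ≤ c := hp c (by simp)
      have hplt : p < c := lt_of_le_of_ne hpc (fun h => hcp h.symm)
      have hpnot : p ∉ s := fun h => absurd (lt_of_lt_of_le hplt (hc p h)) (lt_irrefl p)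
      have hstep : fmStep t (m, some p, r) c
          = ((if 2 * r > t then m ++ [p] else m), some c, 1) := by
        simp [fmStep, hcp]
      rw [List.foldl_cons, hstep, ih hs' c hc _ 1]
      have h1 : ((c :: s).count p : Int) = 0 := by
        have : (c :: s).count p = 0 :=
          List.count_eq_zero.mpr (by
            intro h
            rcases List.mem_cons.mp h with h | h
            · exact hcp h.symm
            · exact hpnot h)
        rw [this]; rfl
      have h2 : (c :: s).filter (fun x => x ≠ p) = c :: s := by
        apply List.filter_eq_self.mpr
        intro x hx
        simp only [ne_eq, decide_eq_true_eq]
        intro he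
        subst he
        rcases List.mem_cons.mp hx with h | h
        · exact hcp h.symm
        · exact hpnot h
      rw [h2, h1, add_zero, majorsOf.eq_2]
      split_ifs with hA hB <;> simp [List.append_assoc]

-- the full scan computes majorsOf of the sorted list
theorem pv_fm_scan (t : Int) (s : List Char) (hs : s.Pairwise (· ≤ ·)) :
    fmFlush t (s.foldl (fmStep t) ([], none, 0)) = majorsOf t s := by
  cases s with
  | nil => simp [fmFlush, majorsOf.eq_1]
  | cons c s =>
    have hc : ∀ x ∈ s, c ≤ x := fun x hx => (List.pairwise_cons.mp hs).1 x hx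
    have hs' : s.Pairwise (· ≤ ·) := (List.pairwise_cons.mp hs).2
    have hstep : fmStep t ([], none, 0) c = ([], some c, 1) := by simp [fmStep]
    rw [List.foldl_cons, hstep, pv_fm_foldl t s hs' c hc [] 1, majorsOf.eq_2]
    simp only [List.nil_append]

-- membership in majorsOf = majority count (no sortedness needed); by strong induction on length
theorem pv_mem_majorsOf_aux (t : Int) :
    ∀ (n : Nat) (u : List Char), u.length ≤ n → ∀ (x : Char),
      (x ∈ majorsOf t u ↔ x ∈ u ∧ 2 * (u.count x : Int) > t) := by
  intro n
  induction n with
  | zero =>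
    intro u hu x
    cases u with
    | nil => simp [majorsOf.eq_1]
    | cons c u => simp at hu
  | succ n ih =>
    intro u hu x
    cases u with
    | nil => simp [majorsOf.eq_1]
    | cons c u =>
      have hlen : (u.filter (fun y => y ≠ c)).length ≤ n :=
        le_trans (List.length_filter_le _ _) (Nat.le_of_succ_le_succ (by simpa using hu))
      rw [majorsOf.eq_2]
      by_cases hx : x = c
      · subst hx
        have hnot : x ∉ majorsOf t (u.filter (fun y => y ≠ x)) := by
          intro h
          have := ((ih _ hlen x).mp h).1
          simp at this
        simp only [List.mem_append, List.mem_cons, List.count_cons_self]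
        constructor
        · intro h
          rcases h with h | h
          · refine ⟨by simp, ?_⟩
            split_ifs at h with hcnt
            · push_cast; push_cast at hcnt; omega
            · simp at h
          · exact absurd h hnot
        · intro ⟨_, hcnt⟩
          left
          have : 2 * (1 + (u.count x : Int)) > t := by push_cast at hcnt ⊢; omega
          simp [this]
      · have hcount : (u.filter (fun y => y ≠ c)).count x = u.count x := by
          rw [List.count_filter]
          simp [hx]
        simp only [List.mem_append, List.mem_cons]
        constructor
        · intro h
          rcases h with h | h
          · split_ifs at h <;> simp_all
          · have := (ih _ hlen x).mp h
            rw [hcount] at this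
            have hcc : (c :: u).count x = u.count x := by simp [Ne.symm hx]
            exact ⟨Or.inr ((List.mem_filter.mp this.1).1), by rw [hcc]; exact this.2⟩
        · intro ⟨hmem, hcnt⟩
          right
          apply (ih _ hlen x).mpr
          rw [hcount]
          have hcc : (c :: u).count x = u.count x := by simp [Ne.symm hx]
          rw [hcc] at hcnt
          refine ⟨List.mem_filter.mpr ⟨?_, by simp [hx]⟩, hcnt⟩
          rcases hmem with h | h
          · exact absurd h hx
          · exact h

theorem pv_mem_majorsOf (t : Int) (u : List Char) (x : Char) :
    x ∈ majorsOf t u ↔ x ∈ u ∧ 2 * (u.count x : Int) > t :=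
  pv_mem_majorsOf_aux t u.length u le_rfl x

-- a foldl of Set.add commutes with an injective map of the elements
theorem pv_foldl_add_map (σ : Char → String) (hσ : Function.Injective σ) :
    ∀ (l : List Char) (t : List Char),
      l.foldl (fun s c => PySem.Set.add s (σ c)) (t.map σ)
        = (l.foldl (fun s c => PySem.Set.add s c) t).map σ := by
  intro l
  induction l with
  | nil => simp
  | cons c l ih =>
    intro t
    have hmem : σ c ∈ t.map σ ↔ c ∈ t := by
      constructor
      · intro h
        obtain ⟨a, ha, he⟩ := List.mem_map.mp h
        exact hσ he ▸ ha
      · exact fun h => List.mem_map.mpr ⟨c, h, rfl⟩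
    by_cases hc : c ∈ t
    · rw [List.foldl_cons, List.foldl_cons,
        PySem.Set.add_of_mem (hmem.mpr hc), PySem.Set.add_of_mem hc, ih]
    · rw [List.foldl_cons, List.foldl_cons,
        PySem.Set.add_of_not_mem (fun h => hc (hmem.mp h)),
        PySem.Set.add_of_not_mem hc]
      have hm : List.map σ t ++ [σ c] = List.map σ (t ++ [c]) := by simp
      rw [hm, ih]

-- a foldl of Set.add over a filtered list is the filter of the foldl
theorem pv_foldl_add_filter (q : Char → Bool) :
    ∀ (l : List Char) (t : List Char),
      (l.filter q).foldl (fun s c => PySem.Set.add s c) (t.filter q)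
        = (l.foldl (fun s c => PySem.Set.add s c) t).filter q := by
  intro l
  induction l with
  | nil => simp
  | cons c l ih =>
    intro t
    by_cases hq : q c
    · have hadd : (PySem.Set.add t c).filter q = PySem.Set.add (t.filter q) c := by
        by_cases hc : c ∈ t
        · rw [PySem.Set.add_of_mem hc,
            PySem.Set.add_of_mem (List.mem_filter.mpr ⟨hc, hq⟩)]
        · rw [PySem.Set.add_of_not_mem hc,
            PySem.Set.add_of_not_mem (fun h => hc (List.mem_filter.mp h).1),
            List.filter_append]
          simp [hq]
      rw [List.filter_cons_of_pos hq, List.foldl_cons, List.foldl_cons, ← hadd, ih]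
    · have hadd : (PySem.Set.add t c).filter q = t.filter q := by
        by_cases hc : c ∈ t
        · rw [PySem.Set.add_of_mem hc]
        · rw [PySem.Set.add_of_not_mem hc, List.filter_append]
          simp [hq]
      rw [List.filter_cons_of_neg (by simpa using hq), List.foldl_cons, ← hadd, ih]

-- B's result list in the same normal form as A's
theorem pv_B_res (chars majors : List Char) (t : Int)
    (hmaj : ∀ c, c ∈ majors ↔ c ∈ chars ∧ 2 * (chars.count c : Int) > t) :
    PySem.Set.ofList ((chars.filter (fun c => majors.contains c)).map (fun c => String.ofList [c]))
      = ((PySem.Set.ofList chars).filter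
          (fun c => decide (2 * (chars.count c : Int) > t))).map (fun c => String.ofList [c]) := by
  rw [PySem.Set.ofList_eq_foldl, List.foldl_map]
  have h1 := pv_foldl_add_map (fun c => String.ofList [c]) pv_ofList_inj
      (chars.filter (fun c => majors.contains c)) []
  simp only [List.map_nil] at h1
  rw [h1]
  have h2 := pv_foldl_add_filter (fun c => majors.contains c) chars []
  simp only [List.filter_nil] at h2
  rw [h2]
  have h3 : (chars.foldl (fun s c => PySem.Set.add s c) []).filter (fun c => majors.contains c)
      = (chars.foldl (fun s c => PySem.Set.add s c) []).filter
          (fun c => decide (2 * (chars.count c : Int) > t)) := by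
    apply List.filter_congr
    intro c hc
    have hcmem : c ∈ chars := by
      have hmem : c ∈ PySem.Set.ofList chars := by rw [PySem.Set.ofList_eq_foldl]; exact hc
      exact (PySem.Set.mem_ofList _ _).mp hmem
    rw [Bool.eq_iff_iff]
    simp only [List.contains_iff_mem, decide_eq_true_eq]
    rw [hmaj c]
    exact ⟨fun h => h.2, fun h => ⟨hcmem, h⟩⟩
  rw [h3, PySem.Set.ofList_eq_foldl]

-- ===== VERDICT (by name: the statement is the Claim_ definition above) =====
theorem find_major_spec : Claim_equal_find_major := by
  intro L _
  unfold Spec_find_major find_major find_major_alt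
  simp only [pv_flatten, pv_A_res]
  set chars := L.flatMap (·.toList) with hchars
  set t := (L.length : Int) with ht
  set srt := PySem.List.sorted chars (fun x => x) false with hsrt
  have hsort : srt.Pairwise (· ≤ ·) := by
    have := PySem.List.sorted_pairwise (xs := chars) (key := fun x : Char => x)
    simpa [hsrt] using this
  have hperm : srt.Perm chars := PySem.List.sorted_perm chars (fun x => x) false
  have hmaj : ∀ c, c ∈ fmFlush t (srt.foldl (fmStep t) ([], none, 0))
      ↔ c ∈ chars ∧ 2 * (chars.count c : Int) > t := by
    intro c
    rw [pv_fm_scan t srt hsort, pv_mem_majorsOf t srt c, hperm.mem_iff, hperm.count_eq]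
  rw [pv_B_res chars _ t hmaj]
  rcases h : ((PySem.Set.ofList chars).filter
      (fun c => decide (2 * (chars.count c : Int) > t))).map (fun c => String.ofList [c]) with _ | _ <;> simp
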